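-- pv_equiv track=rewrite | github.com/PansuriaShrey/Product-Grabber | final_button.py | update
-- ===== SOURCE A (Python) =====
-- def update(str):
--     finalstring=str[0:4]
--     for i in range(4,len(str)):
--         if(str[i]==' '):
--             break
--         else:
--             finalstring+=str[i]
--     return finalstring
-- ===== SOURCE B (Python) =====
-- def update(str):
--     idx = str.find(' ', 4)
--     return str if idx == -1 else str[:idx]
-- ===== Notes on version B (the rewrite author's own statement) =====
-- stated objective: faster
-- what changed: Replaces the per-character accumulator loop (growing finalstring one char at a time with a break on the space character) with a single str.find boundary lookup starting at index 4 followed by one slice.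
import Mathlib
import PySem

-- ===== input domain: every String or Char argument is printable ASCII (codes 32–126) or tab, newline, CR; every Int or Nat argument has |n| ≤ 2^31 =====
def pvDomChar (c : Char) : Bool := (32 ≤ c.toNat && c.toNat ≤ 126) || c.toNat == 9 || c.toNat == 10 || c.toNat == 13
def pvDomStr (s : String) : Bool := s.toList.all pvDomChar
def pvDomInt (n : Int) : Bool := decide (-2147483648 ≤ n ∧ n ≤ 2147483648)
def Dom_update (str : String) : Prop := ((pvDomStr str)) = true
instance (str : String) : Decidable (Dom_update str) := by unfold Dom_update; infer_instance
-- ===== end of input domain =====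

-- B replaces A's char-by-char accumulator loop (quadratic string concatenation, break on space) with one find-from-index-4 plus one slice (objective: faster; measured).

-- ===== PORT A =====
-- the for-loop over range(4, len(str)) with its break, carrying the growing finalstring
def updateGo (cs : List Char) (idxs : List Int) (acc : List Char) : List Char :=
  match idxs with
  | [] => acc
  | i :: rest =>
    match PySem.List.pyGet? cs i with
    | none => acc      -- unreachable: i ∈ range(4, len cs) is always in range
    | some c => if c = ' ' then acc else updateGo cs rest (acc ++ [c])

def update (str : String) : String :=
  let cs := str.toList
  let finalstring := PySem.List.slice cs (some 0) (some 4)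
  String.ofList (updateGo cs (PySem.List.pyRange 4 (cs.length : Int) 1) finalstring)

-- ===== PORT B =====
def update_alt (str : String) : String :=
  let idx := PySem.Str.findFrom str " " 4 none
  if idx = -1 then str else String.ofList (PySem.List.slice str.toList none (some idx))

-- ===== PRECONDITION & SPEC =====
def Spec_update (str : String) (out : String) : Prop := out = update_alt str
instance (str : String) (out : String) : Decidable (Spec_update str out) := by unfold Spec_update; infer_instance

-- ===== CLAIM (what is proved, stated in full; the proofs are below) =====
def Claim_equal_update : Prop := ∀ (str : String), Dom_update str → Spec_update str (update str)

-- ===== LEMMAS AND PROOFS =====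

-- A's loop, started at index k, appends to acc exactly the chars of drop k up to the first space.
theorem updateGo_spec (cs : List Char) (k : Nat) (hk : k ≤ cs.length) (acc : List Char) :
    updateGo cs (PySem.List.pyRange (k : Int) (cs.length : Int) 1) acc
      = acc ++ (cs.drop k).takeWhile (fun c => c ≠ ' ') := by
  induction hn : cs.length - k generalizing k acc with
  | zero =>
    have hk' : k = cs.length := by omega
    subst hk'
    rw [PySem.List.pyRange_one_eq_nil le_rfl]
    simp [updateGo]
  | succ n ih =>
    have hlt : k < cs.length := by omega
    rw [PySem.List.pyRange_one_cons (by exact_mod_cast hlt)]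
    have hget : PySem.List.pyGet? cs (k : Int) = some (cs[k]'hlt) := by
      simp [PySem.List.pyGet?, PySem.List.pyIdx?, hlt]
    have hdrop : cs.drop k = cs[k]'hlt :: cs.drop (k + 1) :=
      List.drop_eq_getElem_cons hlt
    rw [updateGo, hget]
    by_cases hc : cs[k]'hlt = ' '
    · simp [hc, hdrop]
    · simp only [hc, if_false]
      have := ih (k + 1) (by omega) (acc ++ [cs[k]'hlt]) (by omega)
      push_cast at this ⊢
      rw [this, hdrop, List.takeWhile_cons]
      simp [hc]

-- [c] is a prefix of l iff l starts with c
theorem singleton_prefix_iff (c : Char) (l : List Char) :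
    [c] <+: l ↔ l.head? = some c := by
  cases l with
  | nil => simp
  | cons a t =>
    constructor
    · rintro ⟨s, hs⟩
      simp at hs
      simp [hs.1]
    · intro h
      simp at h
      exact ⟨t, by simp [h]⟩

-- [c] is an infix of l iff c ∈ l
theorem singleton_infix_iff (c : Char) (l : List Char) :
    [c] <:+: l ↔ c ∈ l := by
  constructor
  · intro h; exact h.mem (by simp)
  · intro h
    obtain ⟨s, t, hst⟩ := List.append_of_mem h
    exact ⟨s, t, by simp [hst]⟩

-- if the first j chars are not spaces and l[j] is a space, takeWhile stops exactly at j
theorem takeWhile_eq_take_of_first (l : List Char) (j : Nat) (hj : j < l.length)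
    (hlt : ∀ i (h : i < j), l[i]'(by omega) ≠ ' ') (hj' : l[j]'hj = ' ') :
    l.takeWhile (fun c => c ≠ ' ') = l.take j := by
  induction l generalizing j with
  | nil => simp at hj
  | cons a t ih =>
    cases j with
    | zero => simp_all [List.takeWhile_cons]
    | succ j =>
      have ha : a ≠ ' ' := by
        have := hlt 0 (by omega); simpa using this
      simp only [List.takeWhile_cons, List.take_succ_cons]
      rw [if_pos (by simp [ha])]
      congr 1
      exact ih j (by simpa using hj)
        (fun i h => by have := hlt (i + 1) (by omega); simpa using this)
        (by simpa using hj')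

theorem update_eq (str : String) :
    update str = update_alt str := by
  simp only [update, update_alt]
  set cs := str.toList with hcs
  by_cases hlen : 4 ≤ cs.length
  · -- start index 4 is within the string
    have hA := updateGo_spec cs 4 hlen (PySem.List.slice cs (some 0) (some 4))
    push_cast at hA
    rw [hA]
    have hsl : PySem.List.slice cs (some 0) (some 4) = cs.take 4 := by
      rw [PySem.List.slice_zero_start, PySem.List.slice_to cs (by norm_num)]
      rfl
    rw [hsl]
    have hfind : PySem.Str.findFrom str " " 4 none
        = if PySem.Chars.find (cs.drop 4) [' '] = -1 then -1
          else (4 : Int) + PySem.Chars.find (cs.drop 4) [' '] := by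
      rw [PySem.Str.findFrom_eq, ← hcs]
      have := PySem.Chars.findFrom_natCast cs [' '] 4 hlen
      simpa using this
    by_cases hmiss : PySem.Chars.find (cs.drop 4) [' '] = -1
    · -- no space at index ≥ 4: both return the whole string
      rw [hfind, if_pos hmiss, if_pos rfl]
      have hnm : ¬ [' '] <:+: cs.drop 4 := by
        have h0 : PySem.Chars.findFrom cs [' '] (4 : Nat) none = -1 := by
          rw [PySem.Chars.findFrom_natCast cs [' '] 4 hlen, if_pos hmiss]
        exact (PySem.Chars.findFrom_natCast_eq_neg_one_iff cs [' '] 4 hlen).mp h0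
      have hnmem : ' ' ∉ cs.drop 4 := fun h => hnm ((singleton_infix_iff _ _).mpr h)
      have htw : (cs.drop 4).takeWhile (fun c => c ≠ ' ') = cs.drop 4 :=
        List.takeWhile_eq_self_iff.mpr (fun a ha => by
          simp only [decide_eq_true_eq]
          exact fun h => hnmem (h ▸ ha))
      rw [htw, List.take_append_drop, hcs, String.ofList_toList]
    · -- a space exists at some index ≥ 4: both cut there
      have hffne : PySem.Chars.findFrom cs [' '] (4 : Nat) none ≠ -1 := by
        rw [PySem.Chars.findFrom_natCast cs [' '] 4 hlen, if_neg hmiss]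
        have hnn : 0 ≤ PySem.Chars.find (cs.drop 4) [' '] := by
          by_contra h
          push_neg at h
          obtain ⟨h1, h2, h3⟩ := PySem.Chars.findFrom_natCast_spec (cs.drop 4) [' '] 0
            (by omega) (by simpa using hmiss)
          simp at h1
          omega
        omega
      obtain ⟨hge, hpre, hmin⟩ := PySem.Chars.findFrom_natCast_spec cs [' '] 4 hlen hffne
      set m : Int := PySem.Chars.findFrom cs [' '] (4 : Nat) none with hm
      have hm0 : 0 ≤ m := by omega
      have hmlt : m.toNat < cs.length := by
        have := hpre.length_le
        simp at this
        omega
      have hfind' : PySem.Str.findFrom str " " 4 none = m := by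
        have hws : (" " : String).toList = [' '] := by rfl
        rw [PySem.Str.findFrom_eq, ← hcs, hws, hm]
        norm_num
      rw [hfind', if_neg (by omega), PySem.List.slice_to cs hm0]
      have hspace : cs[m.toNat]'hmlt = ' ' := by
        rcases hpre with ⟨t, ht⟩
        rw [List.drop_eq_getElem_cons hmlt] at ht
        have h2 : cs[m.toNat]? = some ' ' := by simpa using (congrArg List.head? ht).symm
        rw [List.getElem?_eq_getElem hmlt] at h2
        simpa using h2
      have hm4 : 4 ≤ m.toNat := by omega
      have hnosp : ∀ i (h : i < m.toNat - 4),
          (cs.drop 4)[i]'(by simp; omega) ≠ ' ' := by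
        intro i h hsp
        apply hmin (4 + i) (by omega) (by omega)
        rw [singleton_prefix_iff]
        have hlt2 : 4 + i < cs.length := by omega
        rw [List.drop_eq_getElem_cons hlt2]
        simp only [List.head?_cons, Option.some.injEq]
        have : (cs.drop 4)[i]'(by simp; omega) = cs[4 + i]'hlt2 := by
          simp [List.getElem_drop]
        rw [this] at hsp
        exact hsp
      have htw : (cs.drop 4).takeWhile (fun c => c ≠ ' ') = (cs.drop 4).take (m.toNat - 4) := by
        apply takeWhile_eq_take_of_first _ _ (by simp; omega) hnosp
        have : (cs.drop 4)[m.toNat - 4]'(by simp; omega) = cs[m.toNat]'hmlt := by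
          simp [List.getElem_drop]
          congr 1
          omega
        rw [this, hspace]
      rw [htw]
      congr 1
      rw [← List.take_add]
      congr 1
      omega
  · -- len(str) < 4: the range is empty on A's side, find starts past the end on B's side
    push_neg at hlen
    rw [PySem.List.pyRange_one_eq_nil (by exact_mod_cast hlen.le)]
    have hff : PySem.Str.findFrom str " " 4 none = -1 := by
      rw [PySem.Str.findFrom_eq, ← hcs]
      simp only [PySem.Chars.findFrom]
      rw [if_pos (by push_cast; omega)]
    rw [hff, if_pos rfl]
    simp only [updateGo]
    rw [PySem.List.slice_zero_start, PySem.List.slice_to str.toList (by norm_num)]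
    rw [List.take_of_length_le (by rw [← hcs]; omega)]
    exact String.ofList_toList

-- ===== VERDICT (by name: the statement is the Claim_ definition above) =====
theorem update_spec : Claim_equal_update := by
  intro str _
  unfold Spec_update
  exact update_eq str
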